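-- pv_equiv track=rewrite | github.com/enshaeden/occams-beard | src/occams_beard/utils/parsing.py | _extract_linux_route_qualifier
-- ===== SOURCE A (Python) =====
-- def _extract_linux_route_qualifier(line: str) -> tuple[str | None, str]:
--     for qualifier in ("unreachable", "blackhole", "prohibit", "throw"):
--         if line.startswith(f"{qualifier} "):
--             return (
--                 f"Default route is marked {qualifier}." if " default" in f" {line}" else qualifier,
--                 line[len(qualifier) + 1 :],
--             )
--     return None, line
-- ===== SOURCE B (Python) =====
-- # The four qualifiers have pairwise distinct lengths (5, 8, 9, 11), so the head
-- # token's length determines the only qualifier it could be: find the first space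
-- # once, dispatch on its position through a length-indexed dict, and do a single
-- # prefix comparison.
-- _QUALIFIER_BY_LEN = {5: "throw", 8: "prohibit", 9: "blackhole", 11: "unreachable"}
--
--
-- def _extract_linux_route_qualifier(line: str) -> tuple[str | None, str]:
--     k = line.find(" ")
--     q = _QUALIFIER_BY_LEN.get(k)
--     if q is not None and line[:k] == q:
--         return (
--             f"Default route is marked {q}." if " default" in f" {line}" else q,
--             line[k + 1:],
--         )
--     return None, line
-- ===== Notes on version B (the rewrite author's own statement) =====
-- stated objective: alternative
-- what changed: Instead of trying four startswith prefix tests in order, B finds the first space once and, since the qualifiers have pairwise distinct lengths (5,8,9,11), dispatches on that position through a length-indexed dict to the only possible qualifier and does a single prefix comparison.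
import Mathlib
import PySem

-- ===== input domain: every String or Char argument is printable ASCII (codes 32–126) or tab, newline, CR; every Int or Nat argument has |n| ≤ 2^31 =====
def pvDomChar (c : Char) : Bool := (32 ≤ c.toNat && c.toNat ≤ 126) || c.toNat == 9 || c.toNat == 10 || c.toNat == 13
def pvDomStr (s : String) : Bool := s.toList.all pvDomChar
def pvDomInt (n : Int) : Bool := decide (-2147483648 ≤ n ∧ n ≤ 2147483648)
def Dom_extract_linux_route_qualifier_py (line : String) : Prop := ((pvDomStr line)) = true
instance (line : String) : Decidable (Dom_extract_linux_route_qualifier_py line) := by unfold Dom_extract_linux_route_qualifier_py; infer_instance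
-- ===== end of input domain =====

-- B replaces A's ordered per-qualifier startswith scan by one find of the first space and a
-- dict dispatch on its position (the qualifiers' lengths 5,8,9,11 are pairwise distinct),
-- followed by a single prefix comparison (objective: alternative).

-- ===== PORT A =====
-- the loop over ("unreachable", "blackhole", "prohibit", "throw"), trying each in order
def extract_linux_route_qualifier_go (qs : List (List Char)) (cs : List Char) : Option String × String :=
  match qs with
  | [] => (none, String.ofList cs)
  | q :: rest =>
    if PySem.Chars.startswith cs (q ++ [' ']) then
      (some (if PySem.Chars.isIn (" default".toList) (' ' :: cs) then
               String.ofList (("Default route is marked ".toList ++ q) ++ ".".toList)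
             else String.ofList q),
       String.ofList (PySem.List.slice cs (some ((q.length : Int) + 1)) none))
    else extract_linux_route_qualifier_go rest cs

def extract_linux_route_qualifier_py (line : String) : Option String × String :=
  extract_linux_route_qualifier_go
    ["unreachable".toList, "blackhole".toList, "prohibit".toList, "throw".toList]
    line.toList

-- ===== PORT B =====
-- _QUALIFIER_BY_LEN = {5: "throw", 8: "prohibit", 9: "blackhole", 11: "unreachable"}
def pvQualByLen : PySem.Dict Int (List Char) :=
  PySem.Dict.ofList [(5, "throw".toList), (8, "prohibit".toList), (9, "blackhole".toList), (11, "unreachable".toList)]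

-- k = line.find(" "); q = _QUALIFIER_BY_LEN.get(k); if q is not None and line[:k] == q: …
def extract_linux_route_qualifier_py_alt (line : String) : Option String × String :=
  match PySem.Dict.get? pvQualByLen (PySem.Chars.find line.toList [' ']) with
  | some q =>
    if PySem.List.slice line.toList none (some (PySem.Chars.find line.toList [' '])) = q then
      (some (if PySem.Chars.isIn (" default".toList) (' ' :: line.toList) then
               String.ofList (("Default route is marked ".toList ++ q) ++ ".".toList)
             else String.ofList q),
       String.ofList (PySem.List.slice line.toList (some (PySem.Chars.find line.toList [' '] + 1)) none))
    else (none, line)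
  | none => (none, line)

-- ===== PRECONDITION & SPEC =====
def Spec_extract_linux_route_qualifier_py (line : String) (out : Option String × String) : Prop := out = extract_linux_route_qualifier_py_alt line
instance (line : String) (out : Option String × String) : Decidable (Spec_extract_linux_route_qualifier_py line out) := by unfold Spec_extract_linux_route_qualifier_py; infer_instance

-- ===== CLAIM (what is proved, stated in full; the proofs are below) =====
def Claim_equal_extract_linux_route_qualifier_py : Prop := ∀ (line : String), Dom_extract_linux_route_qualifier_py line → Spec_extract_linux_route_qualifier_py line (extract_linux_route_qualifier_py line)

-- ===== LEMMAS AND PROOFS =====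

-- A's test 'line.startswith(q + " ")' holds exactly when the part of the line before the
-- first space is q and the line contains a space at all (for q itself free of spaces)
lemma startswith_qual_iff (q cs : List Char) (hq : ' ' ∉ q) :
    PySem.Chars.startswith cs (q ++ [' ']) = true ↔
      (cs.takeWhile (fun c => c != ' ') = q ∧ ' ' ∈ cs) := by
  rw [PySem.Chars.startswith_iff]
  constructor
  · rintro ⟨t, ht⟩
    subst ht
    refine ⟨?_, by simp⟩
    induction q with
    | nil => simp
    | cons a as ih =>
      have ha : a ≠ ' ' := by intro h; exact hq (by simp [h])
      have hb : (a != ' ') = true := by simpa using ha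
      simpa [List.takeWhile_cons, hb] using ih (fun h => hq (List.mem_cons_of_mem a h))
  · rintro ⟨hhead, hsp⟩
    have hsplit := List.takeWhile_append_dropWhile (p := fun c => c != ' ') (l := cs)
    have hdrop : cs.dropWhile (fun c => c != ' ') ≠ [] := by
      intro hnil
      have : cs.takeWhile (fun c => c != ' ') = cs := by
        rw [← hsplit, hnil, List.append_nil, List.takeWhile_idem]
      rw [this] at hhead; subst hhead; exact hq hsp
    obtain ⟨d, ds, hds⟩ := List.exists_cons_of_ne_nil hdrop
    have hd : d = ' ' := by
      have := List.head_dropWhile_not (p := fun c => c != ' ') (l := cs) hdrop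
      simp only [hds, List.head_cons] at this
      simpa using this
    refine ⟨ds, ?_⟩
    rw [← hsplit, hhead, hds, hd]
    simp

-- A's slice line[len(q)+1:] is List.drop
lemma slice_qual_eq (q cs : List Char) :
    PySem.List.slice cs (some ((q.length : Int) + 1)) none = cs.drop (q.length + 1) := by
  have h : ((q.length : Int) + 1) = ((q.length + 1 : Nat) : Int) := by push_cast; ring
  rw [h, PySem.List.slice_from_natCast]

-- characterization of A's loop: it returns the qualifier branch exactly when the line has a
-- space and its head token is one of the qualifiers
lemma go_spec (qs : List (List Char)) (cs : List Char) (hq : ∀ q ∈ qs, ' ' ∉ q) :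
    extract_linux_route_qualifier_go qs cs =
      if ' ' ∈ cs ∧ cs.takeWhile (fun c => c != ' ') ∈ qs then
        (some (if PySem.Chars.isIn (" default".toList) (' ' :: cs) then
                 String.ofList (("Default route is marked ".toList ++ cs.takeWhile (fun c => c != ' ')) ++ ".".toList)
               else String.ofList (cs.takeWhile (fun c => c != ' '))),
         String.ofList (cs.drop ((cs.takeWhile (fun c => c != ' ')).length + 1)))
      else (none, String.ofList cs) := by
  induction qs with
  | nil => simp [extract_linux_route_qualifier_go]
  | cons q rest ih =>
    unfold extract_linux_route_qualifier_go
    by_cases hs : PySem.Chars.startswith cs (q ++ [' ']) = true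
    · obtain ⟨hhead, hsp⟩ := (startswith_qual_iff q cs (hq q (by simp))).mp hs
      have hcond : ' ' ∈ cs ∧ cs.takeWhile (fun c => c != ' ') ∈ q :: rest := ⟨hsp, by simp [hhead]⟩
      rw [if_pos hs, if_pos hcond, hhead, slice_qual_eq]
    · rw [if_neg hs, ih (fun p hp => hq p (List.mem_cons_of_mem q hp))]
      have hne : ¬ (' ' ∈ cs ∧ cs.takeWhile (fun c => c != ' ') = q) := by
        rintro ⟨h1, h2⟩
        exact hs ((startswith_qual_iff q cs (hq q (by simp))).mpr ⟨h2, h1⟩)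
      by_cases hrest : ' ' ∈ cs ∧ cs.takeWhile (fun c => c != ' ') ∈ rest
      · have hcond : ' ' ∈ cs ∧ cs.takeWhile (fun c => c != ' ') ∈ q :: rest :=
          ⟨hrest.1, List.mem_cons_of_mem q hrest.2⟩
        rw [if_pos hrest, if_pos hcond]
      · rw [if_neg hrest, if_neg]
        rintro ⟨h1, h2⟩
        rcases List.mem_cons.mp h2 with h | h
        · exact hne ⟨h1, h⟩
        · exact hrest ⟨h1, h⟩

-- B's find(" ") is the length of the head token when a space occurs at all
lemma singleton_prefix_iff (a : Char) (l : List Char) : [a] <+: l ↔ l.head? = some a := by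
  constructor
  · rintro ⟨t, ht⟩; subst ht; simp
  · intro h
    cases l with
    | nil => simp at h
    | cons b bs => simp only [List.head?_cons, Option.some.injEq] at h; subst h; exact ⟨bs, rfl⟩

lemma dropWhile_eq_drop_tw (p : Char → Bool) (cs : List Char) :
    cs.dropWhile p = cs.drop (cs.takeWhile p).length := by
  induction cs with
  | nil => simp
  | cons a as ih => by_cases h : p a <;> simp [h, ih]

lemma find_space_eq (cs : List Char) (h : ' ' ∈ cs) :
    PySem.Chars.find cs [' '] = ((cs.takeWhile (fun c => c != ' ')).length : Int) := by
  have hdropne : cs.dropWhile (fun c => c != ' ') ≠ [] := by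
    intro hnil
    have heq : cs.takeWhile (fun c => c != ' ') = cs := by
      rw [← List.takeWhile_append_dropWhile (p := fun c => c != ' ') (l := cs), hnil,
        List.append_nil, List.takeWhile_idem]
    have := List.mem_takeWhile_imp (p := fun c => c != ' ') (by rw [heq]; exact h)
    simp at this
  have ha : [' '] <+: cs.drop (cs.takeWhile (fun c => c != ' ')).length := by
    rw [← dropWhile_eq_drop_tw, singleton_prefix_iff, List.head?_eq_some_head hdropne]
    have hh := List.head_dropWhile_not (p := fun c => c != ' ') (l := cs) hdropne
    simpa using hh
  have hb : ∀ i < (cs.takeWhile (fun c => c != ' ')).length, ¬ [' '] <+: cs.drop i := by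
    intro i hi hpre
    rw [singleton_prefix_iff, List.head?_drop] at hpre
    have hsplit := List.takeWhile_append_dropWhile (p := fun c => c != ' ') (l := cs)
    rw [← hsplit, List.getElem?_append_left hi] at hpre
    have hmem : ' ' ∈ cs.takeWhile (fun c => c != ' ') := List.mem_of_getElem? hpre
    have := List.mem_takeWhile_imp hmem
    simp at this
  have hnn : 0 ≤ PySem.Chars.find cs [' '] := by
    rw [PySem.Chars.find_nonneg_iff]
    obtain ⟨s, t', hst⟩ := List.append_of_mem h
    exact ⟨s, t', by rw [hst]; simp⟩
  obtain ⟨h1, h2⟩ := PySem.Chars.find_spec hnn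
  have hft : (PySem.Chars.find cs [' ']).toNat = (cs.takeWhile (fun c => c != ' ')).length := by
    rcases lt_trichotomy (PySem.Chars.find cs [' ']).toNat
        (cs.takeWhile (fun c => c != ' ')).length with hlt | heq | hgt
    · exact absurd h1 (hb _ hlt)
    · exact heq
    · exact absurd ha (h2 _ hgt)
  omega

lemma find_space_neg (cs : List Char) (h : ' ' ∉ cs) :
    PySem.Chars.find cs [' '] = -1 := by
  rw [PySem.Chars.find_eq_neg_one_iff]
  intro hinf
  exact h (hinf.mem (by simp))

-- the only values B's dict can yield
lemma get?_qual_mem (n : Int) (q : List Char)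
    (h : PySem.Dict.get? pvQualByLen n = some q) :
    q ∈ (["unreachable".toList, "blackhole".toList, "prohibit".toList, "throw".toList] : List (List Char)) := by
  have hd : pvQualByLen = PySem.Dict.mk
      [((5:Int), "throw".toList), (8, "prohibit".toList), (9, "blackhole".toList), (11, "unreachable".toList)] := by
    decide
  rw [hd] at h
  simp only [PySem.Dict.get?_mk_cons] at h
  split_ifs at h <;> simp_all [PySem.Dict.get?]

-- the head token is the prefix of the line of its own length
lemma take_head (cs q : List Char) (hhead : cs.takeWhile (fun c => c != ' ') = q) :
    cs.take q.length = q := by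
  subst hhead
  exact (List.prefix_iff_eq_take.mp (List.takeWhile_prefix _)).symm

-- the dict keyed by length returns exactly the matching qualifier
lemma get?_len (q : List Char)
    (hq : q ∈ (["unreachable".toList, "blackhole".toList, "prohibit".toList, "throw".toList] : List (List Char))) :
    PySem.Dict.get? pvQualByLen (q.length : Int) = some q := by
  fin_cases hq <;> rfl

lemma slice_from_len_succ (cs : List Char) (n : Nat) :
    PySem.List.slice cs (some ((n : Int) + 1)) none = cs.drop (n + 1) := by
  have h : ((n : Int) + 1) = ((n + 1 : Nat) : Int) := by push_cast; ring
  rw [h, PySem.List.slice_from_natCast]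

-- ===== VERDICT (by name: the statement is the Claim_ definition above) =====
theorem extract_linux_route_qualifier_py_spec : Claim_equal_extract_linux_route_qualifier_py := by
  intro line _
  unfold Spec_extract_linux_route_qualifier_py
  unfold extract_linux_route_qualifier_py extract_linux_route_qualifier_py_alt
  rw [go_spec _ _ (by decide)]
  by_cases hsp : ' ' ∈ line.toList
  · rw [find_space_eq line.toList hsp]
    by_cases hmem : line.toList.takeWhile (fun c => c != ' ') ∈
        (["unreachable".toList, "blackhole".toList, "prohibit".toList, "throw".toList] : List (List Char))
    · rw [if_pos ⟨hsp, hmem⟩]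
      have hlen := take_head line.toList _ rfl
      have hget := get?_len _ hmem
      rw [← hlen] at hget
      rw [show ((line.toList.takeWhile (fun c => c != ' ')).length : Int)
            = ((line.toList.take (line.toList.takeWhile (fun c => c != ' ')).length).length : Int) from by
          rw [hlen],
        hget, PySem.List.slice_to_natCast, slice_from_len_succ, hlen]
      simp [hlen]
    · rw [if_neg (fun hc => hmem hc.2)]
      rcases hget : PySem.Dict.get? pvQualByLen ((line.toList.takeWhile (fun c => c != ' ')).length : Int)
          with _ | q
      · rw [String.ofList_toList]
      · have hne : line.toList.take (line.toList.takeWhile (fun c => c != ' ')).length ≠ q := by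
          intro hEq
          have htake := take_head line.toList _ rfl
          rw [htake] at hEq
          exact hmem (hEq ▸ get?_qual_mem _ _ hget)
        simp [PySem.List.slice_to_natCast, hne, String.ofList_toList]
  · rw [find_space_neg line.toList hsp,
      if_neg (fun hc => hsp hc.1),
      show PySem.Dict.get? pvQualByLen (-1) = none from rfl,
      String.ofList_toList]
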